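-- pv_equiv track=rewrite | github.com/nixpt/Tadpole | gobyllm/json_repair.py | _close_brackets
-- ===== SOURCE A (Python) =====
-- def _close_brackets(s: str) -> str:
--     """Close any unclosed { or [ brackets."""
--     stack = []
--     in_string = False
--     escape = False
--     for c in s:
--         if escape:
--             escape = False
--             continue
--         if c == "\\":
--             escape = True
--             continue
--         if c == '"':
--             in_string = not in_string
--             continue
--         if in_string:
--             continue
--         if c == "{":
--             stack.append("}")
--         elif c == "[":
--             stack.append("]")
--         elif c in "}]":
--             if stack and stack[-1] == c:
--                 stack.pop()
--     # Close any remaining open brackets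
--     while stack:
--         s += stack.pop()
--     return s
-- ===== SOURCE B (Python) =====
-- def _close_brackets(s: str) -> str:
--     """Close any unclosed { or [ brackets (recursive-descent parser)."""
--     n = len(s)
--
--     def parse(i, closer):
--         """Scan from i looking for `closer`; openers recurse one level deeper.
--         Returns (index after the found closer, "") or, if end of input was
--         reached first, (n, pending closers innermost-first)."""
--         while i < n:
--             c = s[i]
--             if c == "\\":
--                 i += 2  # skip the escaped character
--             elif c == '"':
--                 i += 1  # skip the whole string literal
--                 while i < n and s[i] != '"':
--                     i += 2 if s[i] == "\\" else 1
--                 i += 1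
--             elif c == "{" or c == "[":
--                 i, suffix = parse(i + 1, "}" if c == "{" else "]")
--                 if suffix:  # end of input reached inside: unwind
--                     return i, suffix + (closer or "")
--             elif c == closer:
--                 return i + 1, ""
--             else:
--                 i += 1  # unmatched closer or ordinary char: ignore
--         return n, (closer or "")
--
--     return s + parse(0, None)[1]
-- ===== Notes on version B (the rewrite author's own statement) =====
-- stated objective: alternative
-- what changed: A's single fused loop (explicit stack of expected closers plus in_string/escape booleans) is replaced by a recursive-descent parser: each opener recurses one nesting level, string literals are skipped by a dedicated inner scan, and the closing suffix is built directly while unwinding the recursion - no stack data structure and no lexer state flags.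
import Mathlib
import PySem

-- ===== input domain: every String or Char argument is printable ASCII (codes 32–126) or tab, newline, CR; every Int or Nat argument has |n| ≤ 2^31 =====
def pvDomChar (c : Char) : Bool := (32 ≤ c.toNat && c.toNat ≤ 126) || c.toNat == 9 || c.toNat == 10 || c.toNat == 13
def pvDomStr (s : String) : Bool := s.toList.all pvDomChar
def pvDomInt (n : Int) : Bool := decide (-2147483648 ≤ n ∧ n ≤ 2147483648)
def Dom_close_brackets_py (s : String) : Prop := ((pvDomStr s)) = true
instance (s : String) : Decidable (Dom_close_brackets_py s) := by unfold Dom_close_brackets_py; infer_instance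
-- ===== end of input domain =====

-- B replaces A's fused stack-machine loop by a recursive-descent parser (recursion per nesting
-- level, string literals skipped by an inner scan, suffix built while unwinding); objective:
-- alternative decomposition, same cost.

-- ===== PORT A =====
-- A's fused scan: one fold over the characters carrying (stack, in_string, escape);
-- the Python list-stack (append/pop at the end) is represented head-first, so the
-- final 'while stack: s += stack.pop()' suffix is the Lean list in order.
def cbStepA (st : List Char × Bool × Bool) (c : Char) : List Char × Bool × Bool :=
  let (stack, in_string, escape) := st
  if escape then (stack, in_string, false)
  else if c = '\\' then (stack, in_string, true)
  else if c = '"' then (stack, !in_string, false)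
  else if in_string then (stack, in_string, false)
  else if c = '{' then ('}' :: stack, in_string, false)
  else if c = '[' then (']' :: stack, in_string, false)
  else if c = '}' ∨ c = ']' then
    match stack with
    | t :: rest => if t = c then (rest, in_string, false) else (stack, in_string, false)
    | [] => (stack, in_string, false)
  else (stack, in_string, false)

def close_brackets_py (s : String) : String :=
  let fin := s.toList.foldl cbStepA ([], false, false)
  s ++ String.ofList fin.1

-- ===== PORT B =====
-- Source B's inner while loop: skip the body of a string literal (the opening quote was
-- consumed by the caller); returns the characters after the closing quote.
def cbSkipStr : List Char → List Char
  | [] => []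
  | c :: cs => if c = '"' then cs
               else if c = '\\' then cbSkipStr cs.tail
               else cbSkipStr cs
termination_by cs => cs.length
decreasing_by
· cases cs <;> simp
· simp

-- Source B's `closer or ""`
def cbClos : Option Char → List Char
  | none => []
  | some c => [c]

-- Source B's parse(i, closer): recursion per nesting level, returning (rest of input, suffix).
-- The Nat argument is fuel only making the recursion obviously total (called with length+1,
-- which is never exhausted).
def cbParse : Nat → Option Char → List Char → List Char × List Char
  | 0, closer, cs => (cs, cbClos closer)
  | _ + 1, closer, [] => ([], cbClos closer)
  | fuel + 1, closer, c :: cs =>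
    if c = '\\' then cbParse fuel closer cs.tail
    else if c = '"' then cbParse fuel closer (cbSkipStr cs)
    else if c = '{' ∨ c = '[' then
      match cbParse fuel (some (if c = '{' then '}' else ']')) cs with
      | (rest, []) => cbParse fuel closer rest
      | (rest, suf) => (rest, suf ++ cbClos closer)
    else if some c = closer then (cs, [])
    else cbParse fuel closer cs

def close_brackets_py_alt (s : String) : String :=
  s ++ String.ofList (cbParse (s.toList.length + 1) none s.toList).2

-- ===== PRECONDITION & SPEC =====
def Spec_close_brackets_py (s : String) (out : String) : Prop := out = close_brackets_py_alt s
instance (s : String) (out : String) : Decidable (Spec_close_brackets_py s out) := by unfold Spec_close_brackets_py; infer_instance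

-- ===== CLAIM (what is proved, stated in full; the proofs are below) =====
def Claim_equal_close_brackets_py : Prop := ∀ (s : String), Dom_close_brackets_py s → Spec_close_brackets_py s (close_brackets_py s)

-- ===== LEMMAS AND PROOFS =====

-- proof-only middleman: the structural bracket characters outside string literals …
def cbLex (in_string : Bool) (escape : Bool) : List Char → List Char
  | [] => []
  | c :: cs =>
    if escape then cbLex in_string false cs
    else if c = '\\' then cbLex in_string true cs
    else if c = '"' then cbLex (!in_string) false cs
    else if !in_string && (c = '{' || c = '}' || c = '[' || c = ']') then
      c :: cbLex in_string false cs
    else cbLex in_string false cs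

-- … and the stack step on that token stream
def cbBal (stack : List Char) (c : Char) : List Char :=
  if c = '{' then '}' :: stack
  else if c = '[' then ']' :: stack
  else
    match stack with
    | t :: rest => if t = c then rest else stack
    | [] => stack

-- A's fused fold computes the same stack as balancing the lexed tokens
theorem cb_fusion (cs : List Char) :
    ∀ (stack : List Char) (i e : Bool),
      (cs.foldl cbStepA (stack, i, e)).1 = (cbLex i e cs).foldl cbBal stack := by
  induction cs with
  | nil => intro stack i e; simp [cbLex]
  | cons c cs ih =>
    intro stack i e
    by_cases he : e
    · simp [cbStepA, cbLex, he, ih]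
    · by_cases hb : c = '\\'
      · simp [cbStepA, cbLex, he, hb, ih]
      · by_cases hq : c = '"'
        · simp [cbStepA, cbLex, he, hb, hq, ih]
        · by_cases hi : i
          · simp [cbStepA, cbLex, he, hb, hq, hi, ih]
          · by_cases ho : c = '{'
            · simp [cbStepA, cbLex, he, hb, hq, hi, ho, ih, cbBal]
            · by_cases hs : c = '['
              · simp [cbStepA, cbLex, he, hb, hq, hi, ho, hs, ih, cbBal]
              · by_cases hc : c = '}' ∨ c = ']'
                · cases stack with
                  | nil =>
                    simp [cbStepA, cbLex, he, hb, hq, hi, ho, hs, hc, ih, cbBal]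
                  | cons t rest =>
                    by_cases ht : t = c
                    · simp [cbStepA, cbLex, he, hb, hq, hi, ho, hs, hc, ht, ih, cbBal]
                    · simp [cbStepA, cbLex, he, hb, hq, hi, ho, hs, hc, ht, ih, cbBal]
                · have h1 : ¬ c = '}' := fun h => hc (Or.inl h)
                  have h2 : ¬ c = ']' := fun h => hc (Or.inr h)
                  simp [cbStepA, cbLex, he, hb, hq, hi, ho, hs, h1, h2, ih]

theorem cbSkipStr_len_aux : ∀ (n : Nat) (cs : List Char), cs.length ≤ n →
    (cbSkipStr cs).length ≤ cs.length := by
  intro n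
  induction n with
  | zero =>
    intro cs h
    have : cs = [] := List.eq_nil_of_length_eq_zero (Nat.le_zero.mp h)
    subst this; simp [cbSkipStr]
  | succ n ih =>
    intro cs h
    match cs with
    | [] => simp [cbSkipStr]
    | c :: cs =>
      by_cases hq : c = '"'
      · simp [cbSkipStr, hq]
      · by_cases hb : c = '\\'
        · simp only [cbSkipStr, if_neg hq, if_pos hb]
          have h1 : cs.tail.length ≤ n := by cases cs <;> simp at h ⊢ <;> omega
          have h2 : cs.tail.length ≤ cs.length := by cases cs <;> simp
          have := ih cs.tail h1
          simp; omega
        · simp only [cbSkipStr, if_neg hq, if_neg hb]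
          have := ih cs (by simp at h; omega)
          simp; omega

theorem cbSkipStr_len (cs : List Char) : (cbSkipStr cs).length ≤ cs.length :=
  cbSkipStr_len_aux cs.length cs le_rfl

-- lexing in escape state drops one character
theorem cbLex_escape (i : Bool) (cs : List Char) : cbLex i true cs = cbLex i false cs.tail := by
  cases cs <;> simp [cbLex]

-- lexing the inside of a string literal yields the tokens of what follows it
theorem cbLex_skipStr : ∀ (n : Nat) (cs : List Char), cs.length ≤ n →
    cbLex true false cs = cbLex false false (cbSkipStr cs) := by
  intro n
  induction n with
  | zero =>
    intro cs h
    have : cs = [] := List.eq_nil_of_length_eq_zero (Nat.le_zero.mp h)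
    subst this; simp [cbLex, cbSkipStr]
  | succ n ih =>
    intro cs h
    match cs with
    | [] => simp [cbLex, cbSkipStr]
    | c :: cs =>
      by_cases hb : c = '\\'
      · have h1 : cbLex true false (c :: cs) = cbLex true false cs.tail := by
          simp [cbLex, hb, cbLex_escape]
        have h2 : cbSkipStr (c :: cs) = cbSkipStr cs.tail := by
          simp [cbSkipStr, hb]
        rw [h1, h2]
        exact ih cs.tail (by simp at h ⊢; cases cs <;> simp at * <;> omega)
      · by_cases hq : c = '"'
        · simp [cbLex, cbSkipStr, hq]
        · have h1 : cbLex true false (c :: cs) = cbLex true false cs := by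
            simp [cbLex, hb, hq]
          have h2 : cbSkipStr (c :: cs) = cbSkipStr cs := by
            simp [cbSkipStr, hb, hq]
          rw [h1, h2]
          exact ih cs (by simp at h; omega)

-- the recursive descent at one nesting level, against the token-stack fold:
-- if the closer is found, the tokens consumed so far pop exactly it; if EOF is
-- reached, the suffix is the pending stack above the caller's part.
theorem cbParse_some :
    ∀ (fuel : Nat) (x : Char) (cs : List Char), (x = '}' ∨ x = ']') → cs.length + 1 ≤ fuel →
      (∀ rest, cbParse fuel (some x) cs = (rest, []) →
          rest.length < cs.length ∧
          ∀ stack, (cbLex false false cs).foldl cbBal (x :: stack)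
            = (cbLex false false rest).foldl cbBal stack)
      ∧ (∀ rest suf, cbParse fuel (some x) cs = (rest, suf) → suf ≠ [] →
          ∀ stack, (cbLex false false cs).foldl cbBal (x :: stack) = suf ++ stack) := by
  intro fuel
  induction fuel with
  | zero => intro x cs hx h; omega
  | succ fuel ih =>
    intro x cs hx h
    match cs with
    | [] =>
      refine ⟨fun rest hr => by simp [cbParse, cbClos] at hr, fun rest suf hr _ stack => ?_⟩
      simp [cbParse, cbClos] at hr
      obtain ⟨h1, h2⟩ := hr
      subst h1; subst h2
      simp [cbLex]
    | c :: cs =>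
      have hfuel : cs.length + 1 ≤ fuel := by simp at h; omega
      have hxb : x ≠ '\\' ∧ x ≠ '"' ∧ x ≠ '{' ∧ x ≠ '[' := by
        rcases hx with hx | hx <;> subst hx <;> refine ⟨by decide, by decide, by decide, by decide⟩
      by_cases hb : c = '\\'
      · subst hb
        have hp : cbParse (fuel+1) (some x) ('\\' :: cs) = cbParse fuel (some x) cs.tail := by
          simp [cbParse]
        have hlex : cbLex false false ('\\' :: cs) = cbLex false false cs.tail := by
          simp [cbLex, cbLex_escape]
        have htlen : cs.tail.length ≤ cs.length := by cases cs <;> simp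
        obtain ⟨ih1, ih2⟩ := ih x cs.tail hx (by omega)
        constructor
        · intro rest hr
          rw [hp] at hr
          obtain ⟨hlen, hfold⟩ := ih1 rest hr
          exact ⟨by simp; omega, fun stack => by rw [hlex]; exact hfold stack⟩
        · intro rest suf hr hne stack
          rw [hp] at hr; rw [hlex]; exact ih2 rest suf hr hne stack
      · by_cases hq : c = '"'
        · subst hq
          have hp : cbParse (fuel+1) (some x) ('"' :: cs) = cbParse fuel (some x) (cbSkipStr cs) := by
            simp [cbParse]
          have hlex : cbLex false false ('"' :: cs) = cbLex false false (cbSkipStr cs) := by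
            have := cbLex_skipStr cs.length cs le_rfl
            simp [cbLex, this]
          have hslen : (cbSkipStr cs).length ≤ cs.length := cbSkipStr_len cs
          obtain ⟨ih1, ih2⟩ := ih x (cbSkipStr cs) hx (by omega)
          constructor
          · intro rest hr
            rw [hp] at hr
            obtain ⟨hlen, hfold⟩ := ih1 rest hr
            exact ⟨by simp; omega, fun stack => by rw [hlex]; exact hfold stack⟩
          · intro rest suf hr hne stack
            rw [hp] at hr; rw [hlex]; exact ih2 rest suf hr hne stack
        · by_cases ho : c = '{' ∨ c = '['
          · -- opener: recurse one level with closer y, then continue at this level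
            have hy : (if c = '{' then '}' else ']') = '}' ∨ (if c = '{' then '}' else ']') = ']' := by
              rcases ho with ho | ho <;> subst ho <;> simp
            rcases h1 : cbParse fuel (some (if c = '{' then '}' else ']')) cs with ⟨rest1, suf1⟩
            have hlex : cbLex false false (c :: cs) = c :: cbLex false false cs := by
              rcases ho with ho | ho <;> subst ho <;> simp [cbLex]
            have hbal : ∀ st : List Char,
                cbBal st c = (if c = '{' then '}' else ']') :: st := by
              intro st; rcases ho with ho | ho <;> subst ho <;> simp [cbBal]
            match suf1, h1 with
            | [], h1 =>
              obtain ⟨hlen1, hfold1⟩ := (ih _ cs hy hfuel).1 rest1 h1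
              have hp : cbParse (fuel+1) (some x) (c :: cs) = cbParse fuel (some x) rest1 := by
                rcases ho with ho | ho <;> subst ho <;> simp at h1 <;> simp [cbParse, h1]
              obtain ⟨ih1, ih2⟩ := ih x rest1 hx (by omega)
              constructor
              · intro rest hr
                rw [hp] at hr
                obtain ⟨hlen, hfold⟩ := ih1 rest hr
                refine ⟨by simp; omega, fun stack => ?_⟩
                rw [hlex]
                simp only [List.foldl_cons, hbal]
                rw [hfold1 (x :: stack), hfold stack]
              · intro rest suf hr hne stack
                rw [hp] at hr
                rw [hlex]
                simp only [List.foldl_cons, hbal]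
                rw [hfold1 (x :: stack)]
                exact ih2 rest suf hr hne stack
            | s1 :: t1, h1 =>
              have hp : cbParse (fuel+1) (some x) (c :: cs)
                  = (rest1, (s1 :: t1) ++ [x]) := by
                rcases ho with ho | ho <;> subst ho <;> simp at h1 <;> simp [cbParse, h1, cbClos]
              have hfold1 := (ih _ cs hy hfuel).2 rest1 (s1 :: t1) h1 (by simp)
              constructor
              · intro rest hr
                rw [hp] at hr
                simp at hr
              · intro rest suf hr hne stack
                rw [hp] at hr
                obtain ⟨hr1, hr2⟩ := Prod.mk.injEq .. ▸ hr
                subst hr1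
                rw [hlex]
                simp only [List.foldl_cons, hbal]
                rw [hfold1 (x :: stack), ← hr2]
                simp
          · by_cases hcx : c = x
            · -- the sought closer: pop and return
              subst hcx
              have hp : cbParse (fuel+1) (some c) (c :: cs) = (cs, []) := by
                simp [cbParse, hb, hq, ho]
              have hlex : cbLex false false (c :: cs) = c :: cbLex false false cs := by
                rcases hx with hx | hx <;> subst hx <;> simp [cbLex]
              constructor
              · intro rest hr
                rw [hp] at hr
                obtain ⟨hr1, -⟩ := Prod.mk.injEq .. ▸ hr
                subst hr1
                refine ⟨by simp, fun stack => ?_⟩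
                rw [hlex]
                have : cbBal (c :: stack) c = stack := by
                  rcases hx with hx | hx <;> subst hx <;> simp [cbBal]
                simp only [List.foldl_cons, this]
              · intro rest suf hr hne stack
                rw [hp] at hr
                obtain ⟨-, hr2⟩ := Prod.mk.injEq .. ▸ hr
                exact absurd hr2.symm hne
            · -- ignored character (ordinary, or a closer that does not match)
              have hp : cbParse (fuel+1) (some x) (c :: cs) = cbParse fuel (some x) cs := by
                simp [cbParse, hb, hq, ho, hcx]
              have hstep : ∀ st, (cbLex false false (c :: cs)).foldl cbBal (x :: st)
                  = (cbLex false false cs).foldl cbBal (x :: st) := by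
                intro st
                by_cases hbr : c = '}' ∨ c = ']'
                · have hlex : cbLex false false (c :: cs) = c :: cbLex false false cs := by
                    rcases hbr with hbr | hbr <;> subst hbr <;> simp_all [cbLex]
                  have hba : cbBal (x :: st) c = x :: st := by
                    rcases hbr with hbr | hbr <;> subst hbr <;>
                      simp_all [cbBal] <;> exact fun hh => hcx hh.symm
                  rw [hlex]; simp only [List.foldl_cons, hba]
                · have hlex : cbLex false false (c :: cs) = cbLex false false cs := by
                    have h1 : ¬ c = '}' := fun hh => hbr (Or.inl hh)
                    have h2 : ¬ c = ']' := fun hh => hbr (Or.inr hh)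
                    have h3 : ¬ c = '{' := fun hh => ho (Or.inl hh)
                    have h4 : ¬ c = '[' := fun hh => ho (Or.inr hh)
                    simp [cbLex, hb, hq, h1, h2, h3, h4]
                  rw [hlex]
              obtain ⟨ih1, ih2⟩ := ih x cs hx hfuel
              constructor
              · intro rest hr
                rw [hp] at hr
                obtain ⟨hlen, hfold⟩ := ih1 rest hr
                exact ⟨by simp; omega, fun stack => by rw [hstep]; exact hfold stack⟩
              · intro rest suf hr hne stack
                rw [hp] at hr; rw [hstep]; exact ih2 rest suf hr hne stack

-- the top level: closers never pop (the stack below is empty), so the final stack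
-- of the token fold is exactly the parser's suffix
theorem cbParse_none :
    ∀ (fuel : Nat) (cs : List Char), cs.length + 1 ≤ fuel →
      (cbLex false false cs).foldl cbBal [] = (cbParse fuel none cs).2 := by
  intro fuel
  induction fuel with
  | zero => intro cs h; omega
  | succ fuel ih =>
    intro cs h
    match cs with
    | [] => simp [cbParse, cbClos, cbLex]
    | c :: cs =>
      have hfuel : cs.length + 1 ≤ fuel := by simp at h; omega
      by_cases hb : c = '\\'
      · subst hb
        have hlex : cbLex false false ('\\' :: cs) = cbLex false false cs.tail := by
          simp [cbLex, cbLex_escape]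
        have htlen : cs.tail.length ≤ cs.length := by cases cs <;> simp
        rw [hlex]
        have hp : cbParse (fuel+1) none ('\\' :: cs) = cbParse fuel none cs.tail := by
          simp [cbParse]
        rw [hp]
        exact ih cs.tail (by omega)
      · by_cases hq : c = '"'
        · subst hq
          have hlex : cbLex false false ('"' :: cs) = cbLex false false (cbSkipStr cs) := by
            have := cbLex_skipStr cs.length cs le_rfl
            simp [cbLex, this]
          have hslen : (cbSkipStr cs).length ≤ cs.length := cbSkipStr_len cs
          rw [hlex]
          have hp : cbParse (fuel+1) none ('"' :: cs) = cbParse fuel none (cbSkipStr cs) := by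
            simp [cbParse]
          rw [hp]
          exact ih (cbSkipStr cs) (by omega)
        · by_cases ho : c = '{' ∨ c = '['
          · have hy : (if c = '{' then '}' else ']') = '}' ∨ (if c = '{' then '}' else ']') = ']' := by
              rcases ho with ho | ho <;> subst ho <;> simp
            rcases h1 : cbParse fuel (some (if c = '{' then '}' else ']')) cs with ⟨rest1, suf1⟩
            have hlex : cbLex false false (c :: cs) = c :: cbLex false false cs := by
              rcases ho with ho | ho <;> subst ho <;> simp [cbLex]
            have hbal : cbBal [] c = [if c = '{' then '}' else ']'] := by
              rcases ho with ho | ho <;> subst ho <;> simp [cbBal]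
            rw [hlex]
            simp only [List.foldl_cons, hbal]
            match suf1, h1 with
            | [], h1 =>
              obtain ⟨hlen1, hfold1⟩ := (cbParse_some fuel _ cs hy hfuel).1 rest1 h1
              have hp : cbParse (fuel+1) none (c :: cs) = cbParse fuel none rest1 := by
                rcases ho with ho | ho <;> subst ho <;> simp at h1 <;> simp [cbParse, h1]
              rw [hp, hfold1 []]
              exact ih rest1 (by omega)
            | s1 :: t1, h1 =>
              have hfold1 := (cbParse_some fuel _ cs hy hfuel).2 rest1 (s1 :: t1) h1 (by simp)
              have hp : cbParse (fuel+1) none (c :: cs) = (rest1, s1 :: t1) := by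
                rcases ho with ho | ho <;> subst ho <;> simp at h1 <;> simp [cbParse, h1, cbClos]
              rw [hp, hfold1 []]
              simp
          · have hp : cbParse (fuel+1) none (c :: cs) = cbParse fuel none cs := by
              simp [cbParse, hb, hq, ho]
            rw [hp]
            by_cases hbr : c = '}' ∨ c = ']'
            · have hlex : cbLex false false (c :: cs) = c :: cbLex false false cs := by
                rcases hbr with hbr | hbr <;> subst hbr <;> simp_all [cbLex]
              have hba : cbBal [] c = [] := by
                rcases hbr with hbr | hbr <;> subst hbr <;> simp_all [cbBal]
              rw [hlex]
              simp only [List.foldl_cons, hba]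
              exact ih cs hfuel
            · have h1 : ¬ c = '}' := fun hh => hbr (Or.inl hh)
              have h2 : ¬ c = ']' := fun hh => hbr (Or.inr hh)
              have h3 : ¬ c = '{' := fun hh => ho (Or.inl hh)
              have h4 : ¬ c = '[' := fun hh => ho (Or.inr hh)
              have hlex : cbLex false false (c :: cs) = cbLex false false cs := by
                simp [cbLex, hb, hq, h1, h2, h3, h4]
              rw [hlex]
              exact ih cs hfuel

-- ===== VERDICT (by name: the statement is the Claim_ definition above) =====
theorem close_brackets_py_spec : Claim_equal_close_brackets_py := by
  intro s _
  unfold Spec_close_brackets_py close_brackets_py close_brackets_py_alt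
  have h1 := cb_fusion s.toList [] false false
  have h2 := cbParse_none (s.toList.length + 1) s.toList le_rfl
  show s ++ String.ofList (List.foldl cbStepA ([], false, false) s.toList).1 = _
  rw [h1, h2]
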